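-- pv_equiv track=rewrite | github.com/socdef/BMTTNC-HUTECH-1053 | lab-02/cipher/playfair/playfair_cipher.py | prepare_plaintext
-- ===== SOURCE A (Python) =====
-- def prepare_plaintext(text):
--     text = text.upper().replace("J", "I")
--     result = ""
--     i = 0
--     while i < len(text):
--         a = text[i]
--         b = text[i + 1] if i + 1 < len(text) else "X"
--         if a == b:
--             result += a + "X"
--             i += 1
--         else:
--             result += a + b
--             i += 2
--     if len(result) % 2 != 0:
--         result += "X"
--     return result
-- ===== SOURCE B (Python) =====
-- def prepare_plaintext(text):
--     text = text.upper().replace("J", "I")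
--     out = []
--     for c in text:
--         if len(out) % 2 == 1 and out[-1] == c:
--             out.append("X")
--         out.append(c)
--     if len(out) % 2 == 1:
--         out.append("X")
--     return "".join(out)
-- ===== Notes on version B (the rewrite author's own statement) =====
-- stated objective: simpler
-- what changed: Replaces A's indexed while-loop with next-char lookahead, a variable index step and repeated string concatenation by a single char-by-char pass appending to a list, branching on the parity of the output length and on its last character, with a final parity pad and a join at the end.
import Mathlib
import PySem

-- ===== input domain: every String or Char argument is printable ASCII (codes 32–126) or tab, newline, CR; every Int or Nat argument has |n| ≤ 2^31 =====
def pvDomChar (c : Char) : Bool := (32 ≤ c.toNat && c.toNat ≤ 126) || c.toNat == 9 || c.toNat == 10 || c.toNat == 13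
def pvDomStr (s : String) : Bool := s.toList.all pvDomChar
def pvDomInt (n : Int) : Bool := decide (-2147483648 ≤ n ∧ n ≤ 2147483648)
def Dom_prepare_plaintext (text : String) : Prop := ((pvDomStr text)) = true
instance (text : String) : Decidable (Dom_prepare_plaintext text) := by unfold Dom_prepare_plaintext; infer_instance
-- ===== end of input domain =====

-- B keeps only the running output and its parity (append-only single pass over each char),
-- instead of A's index loop with next-char lookahead and variable step; objective: simpler.

-- ===== PORT A =====
-- A's while loop: a = text[i], b = text[i+1] or 'X'; equal pair advances i by 1, else by 2.
def pvGoA : List Char → List Char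
  | [] => []
  | a :: rest =>
    let b := match rest with | [] => 'X' | c :: _ => c
    if a = b then a :: 'X' :: pvGoA rest
    else a :: b :: pvGoA rest.tail
termination_by l => l.length
decreasing_by
  all_goals simp only [List.length_cons, List.length_tail]; omega

def prepare_plaintext (text : String) : String :=
  let t := PySem.Str.replace (PySem.Str.upper text) "J" "I"
  let result := pvGoA t.toList
  let result := if result.length % 2 ≠ 0 then result ++ ['X'] else result
  String.ofList result

-- ===== PORT B =====
-- Source B's loop: out grows char by char; when out is odd-length and ends in c, insert 'X' first.
def pvGoB : List Char → List Char → List Char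
  | out, [] => out
  | out, c :: rest =>
    if out.length % 2 = 1 ∧ out.getLast? = some c then pvGoB (out ++ ['X', c]) rest
    else pvGoB (out ++ [c]) rest

def prepare_plaintext_alt (text : String) : String :=
  let t := PySem.Str.replace (PySem.Str.upper text) "J" "I"
  let out := pvGoB [] t.toList
  let out := if out.length % 2 = 1 then out ++ ['X'] else out
  String.ofList out

-- ===== PRECONDITION & SPEC =====
def Spec_prepare_plaintext (text : String) (out : String) : Prop := out = prepare_plaintext_alt text
instance (text : String) (out : String) : Decidable (Spec_prepare_plaintext text out) := by unfold Spec_prepare_plaintext; infer_instance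

-- ===== CLAIM (what is proved, stated in full; the proofs are below) =====
def Claim_equal_prepare_plaintext : Prop := ∀ (text : String), Dom_prepare_plaintext text → Spec_prepare_plaintext text (prepare_plaintext text)

-- ===== LEMMAS AND PROOFS =====

-- B's final odd-length padding, as a function (used only in the proofs)
def pvPad (l : List Char) : List Char := if l.length % 2 = 1 then l ++ ['X'] else l

lemma pvPad_even (l : List Char) : (pvPad l).length % 2 = 0 := by
  unfold pvPad
  split_ifs with h
  · simp only [List.length_append, List.length_cons, List.length_nil]; omega
  · omega

-- Main invariant, by strong induction on the remaining input:
-- L: from an odd output ending in a, B finishes like A on (a :: rest);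
-- E: from an even output, B finishes like A on rest.
lemma pvMain : ∀ (n : Nat) (rest : List Char), rest.length = n →
    ((∀ (a : Char) (out : List Char), out.length % 2 = 0 →
        pvPad (pvGoB (out ++ [a]) rest) = out ++ pvGoA (a :: rest)) ∧
     (∀ (out : List Char), out.length % 2 = 0 →
        pvPad (pvGoB out rest) = out ++ pvGoA rest)) := by
  intro n
  induction n with
  | zero =>
    intro rest h
    rw [List.length_eq_zero_iff] at h
    subst h
    constructor
    · intro a out hout
      have hodd : (out ++ [a]).length % 2 = 1 := by
        simp only [List.length_append, List.length_cons, List.length_nil]; omega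
      show pvPad (out ++ [a]) = out ++ pvGoA [a]
      unfold pvPad
      rw [if_pos hodd]
      have hA : pvGoA [a] = [a, 'X'] := by
        rw [pvGoA]
        by_cases ha : a = 'X' <;> · simp [ha, pvGoA]
      rw [hA]; simp
    · intro out hout
      show pvPad out = out ++ pvGoA []
      unfold pvPad
      rw [if_neg (by omega)]
      simp [pvGoA]
  | succ n ih =>
    intro rest h
    cases rest with
    | nil => simp at h
    | cons b r =>
      have hr : r.length = n := by simpa using h
      constructor
      · intro a out hout
        have hodd : (out ++ [a]).length % 2 = 1 := by
          simp only [List.length_append, List.length_cons, List.length_nil]; omega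
        have hlast : (out ++ [a]).getLast? = some a := by simp
        by_cases hab : a = b
        · subst hab
          have hstep : pvGoB (out ++ [a]) (a :: r) = pvGoB ((out ++ [a]) ++ ['X', a]) r := by
            show (if (out ++ [a]).length % 2 = 1 ∧ (out ++ [a]).getLast? = some a then
                pvGoB ((out ++ [a]) ++ ['X', a]) r else pvGoB ((out ++ [a]) ++ [a]) r) = _
            rw [if_pos ⟨hodd, hlast⟩]
          have hassoc : (out ++ [a]) ++ ['X', a] = (out ++ [a, 'X']) ++ [a] := by simp
          rw [hstep, hassoc]
          have hout' : (out ++ [a, 'X']).length % 2 = 0 := by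
            simp only [List.length_append, List.length_cons, List.length_nil]; omega
          rw [(ih r hr).1 a (out ++ [a, 'X']) hout']
          simp [pvGoA]
        · have hcond : ¬ ((out ++ [a]).length % 2 = 1 ∧ (out ++ [a]).getLast? = some b) := by
            rw [hlast]; simp [hab]
          have hstep : pvGoB (out ++ [a]) (b :: r) = pvGoB ((out ++ [a]) ++ [b]) r := by
            show (if (out ++ [a]).length % 2 = 1 ∧ (out ++ [a]).getLast? = some b then
                pvGoB ((out ++ [a]) ++ ['X', b]) r else pvGoB ((out ++ [a]) ++ [b]) r) = _
            rw [if_neg hcond]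
          rw [hstep]
          have hout' : ((out ++ [a]) ++ [b]).length % 2 = 0 := by
            simp only [List.length_append, List.length_cons, List.length_nil]; omega
          rw [(ih r hr).2 ((out ++ [a]) ++ [b]) hout']
          simp [pvGoA, hab]
      · intro out hout
        have hcond : ¬ (out.length % 2 = 1 ∧ out.getLast? = some b) := by
          intro hc; omega
        have hstep : pvGoB out (b :: r) = pvGoB (out ++ [b]) r := by
          show (if out.length % 2 = 1 ∧ out.getLast? = some b then
              pvGoB (out ++ ['X', b]) r else pvGoB (out ++ [b]) r) = _
          rw [if_neg hcond]
        rw [hstep]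
        exact (ih r hr).1 b out hout

lemma pvGoB_eq (l : List Char) : pvPad (pvGoB [] l) = pvGoA l :=
  (pvMain l.length l rfl).2 [] rfl

lemma pvKey (l : List Char) :
    (if (pvGoA l).length % 2 ≠ 0 then pvGoA l ++ ['X'] else pvGoA l)
      = (if (pvGoB [] l).length % 2 = 1 then pvGoB [] l ++ ['X'] else pvGoB [] l) := by
  have h2 : pvPad (pvGoB [] l) = pvGoA l := pvGoB_eq l
  have heven : (pvGoA l).length % 2 = 0 := h2 ▸ pvPad_even (pvGoB [] l)
  rw [if_neg (show ¬ (pvGoA l).length % 2 ≠ 0 by omega)]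
  show pvGoA l = pvPad (pvGoB [] l)
  exact h2.symm

-- ===== VERDICT (by name: the statement is the Claim_ definition above) =====
theorem prepare_plaintext_spec : Claim_equal_prepare_plaintext := by
  intro text _
  unfold Spec_prepare_plaintext prepare_plaintext prepare_plaintext_alt
  exact congrArg String.ofList (pvKey _)
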